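-- pv_equiv track=rewrite | github.com/nuvudev/nuvu-scan | nuvu_scan/core/providers/aws/collectors/lambda_collector.py | _check_for_secrets
-- ===== SOURCE A (Python) =====
-- def _check_for_secrets(env_vars: dict) -> bool:
--     """Check if environment variables might contain secrets."""
--     secret_patterns = [
--         "password",
--         "secret",
--         "api_key",
--         "apikey",
--         "token",
--         "access_key",
--         "private_key",
--         "credential",
--         "auth",
--     ]
--
--     for key in env_vars.keys():
--         key_lower = key.lower()
--         for pattern in secret_patterns:
--             if pattern in key_lower:
--                 return True
--
--     return False
-- ===== SOURCE B (Python) =====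
-- def _check_for_secrets(env_vars: dict) -> bool:
--     """Check if environment variables might contain secrets."""
--     secret_patterns = [
--         "password",
--         "secret",
--         "api_key",
--         "apikey",
--         "token",
--         "access_key",
--         "private_key",
--         "credential",
--         "auth",
--     ]
--
--     def suffix_scan(s: str) -> bool:
--         # a pattern occurs in s iff some suffix of s starts with a pattern
--         while True:
--             if any(s.startswith(p) for p in secret_patterns):
--                 return True
--             if not s:
--                 return False
--             s = s[1:]
--
--     for key in env_vars.keys():
--         if suffix_scan(key.lower()):
--             return True
--     return False
-- ===== Notes on version B (the rewrite author's own statement) =====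
-- stated objective: alternative
-- what changed: Replaces A's built-in substring test ('pattern in key_lower') inside a nested pattern loop with an explicit recursive suffix scan: for each lowercased key it walks the string character by character and tests at every position whether any pattern is a literal prefix there, so the substring search is hand-rolled instead of delegated to 'in'.
import Mathlib
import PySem

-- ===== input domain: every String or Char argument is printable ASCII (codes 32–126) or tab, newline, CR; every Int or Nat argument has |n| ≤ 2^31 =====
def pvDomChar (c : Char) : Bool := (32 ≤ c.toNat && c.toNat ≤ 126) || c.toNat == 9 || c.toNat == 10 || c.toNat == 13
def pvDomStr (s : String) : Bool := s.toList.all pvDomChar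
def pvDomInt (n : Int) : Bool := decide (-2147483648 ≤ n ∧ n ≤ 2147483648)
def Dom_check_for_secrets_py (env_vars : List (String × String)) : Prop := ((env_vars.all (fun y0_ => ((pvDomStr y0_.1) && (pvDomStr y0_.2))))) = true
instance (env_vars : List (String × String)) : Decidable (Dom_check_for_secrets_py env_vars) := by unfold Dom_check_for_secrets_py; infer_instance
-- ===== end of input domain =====

-- B hand-rolls the substring search: an explicit recursive suffix scan testing each
-- position for a pattern prefix, instead of A's built-in 'pattern in key_lower'
-- inside a nested pattern loop (objective: alternative, same cost).

-- ===== PORT A =====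
def secretPatternsA : List String :=
  ["password", "secret", "api_key", "apikey", "token",
   "access_key", "private_key", "credential", "auth"]

-- for key in env_vars.keys(): key_lower = key.lower(); for pattern in …: if pattern in key_lower: return True
def check_for_secrets_py (env_vars : List (String × String)) : Bool :=
  env_vars.any (fun kv =>
    let key_lower := PySem.Str.lower kv.1
    secretPatternsA.any (fun pattern => PySem.Str.isIn pattern key_lower))

-- ===== PORT B =====
def secretPatternsB : List String :=
  ["password", "secret", "api_key", "apikey", "token",
   "access_key", "private_key", "credential", "auth"]

-- def suffix_scan(s): while True: if any(s.startswith(p) for p in secret_patterns): return True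
--                                 if not s: return False
--                                 s = s[1:]
def suffixScan : List Char → Bool
  | [] =>
      if secretPatternsB.any (fun p => PySem.Chars.startswith [] p.toList) then true
      else false
  | c :: rest =>
      if secretPatternsB.any (fun p => PySem.Chars.startswith (c :: rest) p.toList) then true
      else suffixScan rest

-- for key in env_vars.keys(): if suffix_scan(key.lower()): return True
def check_for_secrets_py_alt (env_vars : List (String × String)) : Bool :=
  env_vars.any (fun kv => suffixScan (PySem.Chars.lower kv.1.toList))

-- ===== PRECONDITION & SPEC =====
def Spec_check_for_secrets_py (env_vars : List (String × String)) (out : Bool) : Prop := out = check_for_secrets_py_alt env_vars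
instance (env_vars : List (String × String)) (out : Bool) : Decidable (Spec_check_for_secrets_py env_vars out) := by unfold Spec_check_for_secrets_py; infer_instance

-- ===== CLAIM (what is proved, stated in full; the proofs are below) =====
def Claim_equal_check_for_secrets_py : Prop := ∀ (env_vars : List (String × String)), Dom_check_for_secrets_py env_vars → Spec_check_for_secrets_py env_vars (check_for_secrets_py env_vars)

-- ===== LEMMAS AND PROOFS =====

-- the suffix scan finds a pattern iff some pattern is an infix of the string
theorem suffixScan_iff (s : List Char) :
    suffixScan s = true ↔ ∃ p ∈ secretPatternsB, p.toList <:+: s := by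
  induction s with
  | nil =>
    constructor
    · intro h
      rcases List.any_eq_true.mp (by simpa [suffixScan] using h) with ⟨p, hp, hpre⟩
      exact ⟨p, hp, (((PySem.Chars.startswith_iff _ _).mp hpre)).isInfix⟩
    · rintro ⟨p, hp, hinf⟩
      simp only [suffixScan]
      rw [if_pos]
      exact List.any_eq_true.mpr ⟨p, hp,
        (PySem.Chars.startswith_iff _ _).mpr (List.infix_nil.mp hinf ▸ List.nil_prefix)⟩
  | cons c rest ih =>
    by_cases h : secretPatternsB.any (fun p => PySem.Chars.startswith (c :: rest) p.toList) = true
    · simp only [suffixScan, h, if_true, true_iff]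
      rcases List.any_eq_true.mp h with ⟨p, hp, hpre⟩
      exact ⟨p, hp, (((PySem.Chars.startswith_iff _ _).mp hpre)).isInfix⟩
    · rw [show suffixScan (c :: rest) = suffixScan rest by simp [suffixScan, h], ih]
      constructor
      · rintro ⟨p, hp, hinf⟩
        exact ⟨p, hp, hinf.trans (List.suffix_cons c rest).isInfix⟩
      · rintro ⟨p, hp, hinf⟩
        rcases List.infix_cons_iff.mp hinf with hpre | hinf'
        · exact absurd (List.any_eq_true.mpr ⟨p, hp, (PySem.Chars.startswith_iff _ _).mpr hpre⟩) h
        · exact ⟨p, hp, hinf'⟩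

-- ===== VERDICT (by name: the statement is the Claim_ definition above) =====
theorem check_for_secrets_py_spec : Claim_equal_check_for_secrets_py := by
  intro env_vars _
  unfold Spec_check_for_secrets_py check_for_secrets_py check_for_secrets_py_alt
  rw [Bool.eq_iff_iff]
  simp only [List.any_eq_true, PySem.Str.isIn_eq, PySem.Chars.isIn_iff_infix,
    PySem.Str.toList_lower, suffixScan_iff]
  constructor
  · rintro ⟨kv, hkv, p, hp, hinf⟩
    exact ⟨kv, hkv, p, show p ∈ secretPatternsB by revert hp; simp [secretPatternsA, secretPatternsB], hinf⟩
  · rintro ⟨kv, hkv, p, hp, hinf⟩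
    exact ⟨kv, hkv, p, show p ∈ secretPatternsA by revert hp; simp [secretPatternsA, secretPatternsB], hinf⟩
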